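-- pv_equiv track=rewrite | github.com/martinwinther/transformative-books | scripts/fill_genres.py | sort_genres
-- ===== SOURCE A (Python) =====
-- PRIORITY = [
--     "Science Fiction",
--     "Fantasy",
--     "Magical Realism",
--     "Dystopian Fiction",
--     "Cyberpunk",
--     "Alternate History",
--     "Horror",
--     "Gothic Fiction",
--     "Mystery",
--     "Crime Fiction",
--     "Thriller",
--     "Adventure",
--     "Western",
--     "War Fiction",
--     "Historical Fiction",
--     "Religious Fiction",
--     "Philosophical Fiction",
--     "Psychological Fiction",
--     "Coming of Age",
--     "Satire",
--     "Romance",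
--     "Experimental Fiction",
--     "Short Stories",
--     "Essays",
--     "Memoir",
--     "Journalism",
--     "Travel Writing",
--     "Nature Writing",
--     "Literary Criticism",
--     "Philosophy",
--     "Political Theory",
--     "Religion",
--     "Spirituality",
--     "Drama",
--     "Graphic Novel",
--     "Epic Poetry",
--     "Poetry",
--     "Mythology",
--     "Children's Fiction",
--     "Literary Fiction",
-- ]
--
-- def sort_genres(scores):
--     order = {genre: index for index, genre in enumerate(PRIORITY)}
--     return [
--         genre
--         for genre, _ in sorted(
--             scores.items(),
--             key=lambda item: (-item[1], order[item[0]]),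
--         )
--         if item_is_useful(genre, scores)
--     ]
--
-- def item_is_useful(genre, scores):
--     if genre == "Literary Fiction":
--         return False
--     if genre == "Philosophical Fiction" and "Philosophy" in scores:
--         return scores[genre] >= scores["Philosophy"]
--     return True
-- ===== SOURCE B (Python) =====
-- PRIORITY = [
--     "Science Fiction",
--     "Fantasy",
--     "Magical Realism",
--     "Dystopian Fiction",
--     "Cyberpunk",
--     "Alternate History",
--     "Horror",
--     "Gothic Fiction",
--     "Mystery",
--     "Crime Fiction",
--     "Thriller",
--     "Adventure",
--     "Western",
--     "War Fiction",
--     "Historical Fiction",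
--     "Religious Fiction",
--     "Philosophical Fiction",
--     "Psychological Fiction",
--     "Coming of Age",
--     "Satire",
--     "Romance",
--     "Experimental Fiction",
--     "Short Stories",
--     "Essays",
--     "Memoir",
--     "Journalism",
--     "Travel Writing",
--     "Nature Writing",
--     "Literary Criticism",
--     "Philosophy",
--     "Political Theory",
--     "Religion",
--     "Spirituality",
--     "Drama",
--     "Graphic Novel",
--     "Epic Poetry",
--     "Poetry",
--     "Mythology",
--     "Children's Fiction",
--     "Literary Fiction",
-- ]
--
-- def sort_genres(scores):
--     # Group the genres by score (one hash pass), then emit the distinct scores in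
--     # descending order, sorting only each small bucket by priority index: no
--     # composite-key comparison sort over all items.
--     order = {genre: index for index, genre in enumerate(PRIORITY)}
--     buckets = {}
--     for genre, score in scores.items():
--         buckets.setdefault(score, []).append(genre)
--     result = []
--     for score in sorted(buckets, reverse=True):
--         for genre in sorted(buckets[score], key=lambda g: order[g]):
--             if genre == "Literary Fiction":
--                 continue
--             if genre == "Philosophical Fiction" and "Philosophy" in scores and score < scores["Philosophy"]:
--                 continue
--             result.append(genre)
--     return result
-- ===== Notes on version B (the rewrite author's own statement) =====
-- stated objective: alternative
-- what changed: Replaces A's single comparison sort of all items by the composite (-score, priority-index) key with a group-by decomposition: one hash pass buckets the genres by score, only the distinct scores are sorted (descending), each small bucket is sorted by priority index alone, and the buckets are emitted with the filter inlined on the already-known score.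
import Mathlib
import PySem

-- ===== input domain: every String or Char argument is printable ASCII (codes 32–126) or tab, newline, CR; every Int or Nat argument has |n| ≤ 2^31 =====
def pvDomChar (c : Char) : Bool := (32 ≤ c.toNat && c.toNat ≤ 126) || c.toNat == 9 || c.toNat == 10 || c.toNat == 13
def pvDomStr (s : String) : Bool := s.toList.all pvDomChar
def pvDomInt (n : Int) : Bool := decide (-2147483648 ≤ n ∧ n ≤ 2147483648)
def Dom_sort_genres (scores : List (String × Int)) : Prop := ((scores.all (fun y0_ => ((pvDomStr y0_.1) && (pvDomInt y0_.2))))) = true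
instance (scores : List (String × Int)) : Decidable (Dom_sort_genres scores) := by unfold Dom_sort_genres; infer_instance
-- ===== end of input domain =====

-- B replaces A's composite-key comparison sort of all items by a group-by pass
-- (buckets keyed by score), a sort of the distinct scores, and a priority sort of
-- each small bucket (objective: alternative algorithm, similar cost).

-- ===== PORT A =====
def pvPRIORITY : List String := ["Science Fiction","Fantasy","Magical Realism","Dystopian Fiction","Cyberpunk","Alternate History","Horror","Gothic Fiction","Mystery","Crime Fiction","Thriller","Adventure","Western","War Fiction","Historical Fiction","Religious Fiction","Philosophical Fiction","Psychological Fiction","Coming of Age","Satire","Romance","Experimental Fiction","Short Stories","Essays","Memoir","Journalism","Travel Writing","Nature Writing","Literary Criticism","Philosophy","Political Theory","Religion","Spirituality","Drama","Graphic Novel","Epic Poetry","Poetry","Mythology","Children's Fiction","Literary Fiction"]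

-- order = {genre: index for index, genre in enumerate(PRIORITY)}
def pvOrder : PySem.Dict String Int :=
  (PySem.List.enumerate pvPRIORITY 0).foldl (fun d p => d.insert p.2 p.1) PySem.Dict.empty

def item_is_useful (genre : String) (scores : List (String × Int)) : Bool :=
  if genre == "Literary Fiction" then false
  else if genre == "Philosophical Fiction" && (PySem.Dict.mk scores).contains "Philosophy" then
    -- scores[...] is a dict lookup; the keys are present whenever A runs this line, so the default is unreachable
    decide ((PySem.Dict.mk scores).getD genre 0 ≥ (PySem.Dict.mk scores).getD "Philosophy" 0)
  else true

def sort_genres (scores : List (String × Int)) : List String :=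
  -- order[item[0]] raises KeyError for genres outside PRIORITY: those inputs are excluded by Pre_ (getD's default is unreachable there)
  ((PySem.List.sorted2 scores (fun item => -item.2) (fun item => pvOrder.getD item.1 0) false).filter
      (fun p => item_is_useful p.1 scores)).map (fun p => p.1)

-- ===== PORT B =====
def sort_genres_alt (scores : List (String × Int)) : List String :=
  -- for genre, score in scores.items(): buckets.setdefault(score, []).append(genre)
  let buckets := scores.foldl (fun b p => b.modify p.2 [] (fun l => l ++ [p.1])) PySem.Dict.empty
  -- for score in sorted(buckets, reverse=True): for genre in sorted(buckets[score], key=…): …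
  -- order[g] in the bucket sort's key raises KeyError for genres outside PRIORITY:
  -- those inputs are excluded by Pre_ (getD's default is unreachable there)
  (PySem.List.sorted buckets.keys (fun s => s) true).foldl (fun result s =>
    (PySem.List.sorted (buckets.getD s []) (fun g => pvOrder.getD g 0) false).foldl (fun result g =>
      if g == "Literary Fiction" then result
      else if g == "Philosophical Fiction" && (PySem.Dict.mk scores).contains "Philosophy"
              && decide (s < (PySem.Dict.mk scores).getD "Philosophy" 0) then result
      else result ++ [g]) result) []

-- ===== PRECONDITION & SPEC =====
-- Pre_ excludes inputs where A raises KeyError (a genre outside PRIORITY) and assoc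
-- lists with duplicate keys, which cannot arise from a Python dict.
def Pre_sort_genres (scores : List (String × Int)) : Prop :=
  (scores.map Prod.fst).Nodup ∧ ∀ p ∈ scores, p.1 ∈ pvPRIORITY
instance (scores : List (String × Int)) : Decidable (Pre_sort_genres scores) := by
  unfold Pre_sort_genres; infer_instance

def pvWitness_sort_genres : (List (String × Int)) :=
  [("Fantasy", 3), ("Horror", 3), ("Philosophy", 2), ("Philosophical Fiction", 1)]

def Spec_sort_genres (scores : List (String × Int)) (out : List String) : Prop := out = sort_genres_alt scores
instance (scores : List (String × Int)) (out : List String) : Decidable (Spec_sort_genres scores out) := by unfold Spec_sort_genres; infer_instance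

-- ===== CLAIM (what is proved, stated in full; the proofs are below) =====
def Claim_equal_sort_genres : Prop := ∀ (scores : List (String × Int)), Dom_sort_genres scores → Pre_sort_genres scores → Spec_sort_genres scores (sort_genres scores)

-- ===== LEMMAS AND PROOFS =====

-- the single Int key that realises A's lexicographic pair key (-score, priority index)
def pvKey (p : String × Int) : Int := (-p.2) * 64 + pvOrder.getD p.1 0

set_option maxRecDepth 10000 in
theorem pvIdx_fact : ∀ g ∈ pvPRIORITY,
    0 ≤ pvOrder.getD g 0 ∧ pvOrder.getD g 0 < 64 ∧
      pvPRIORITY[(pvOrder.getD g 0).toNat]? = some g := by decide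

theorem pvIdx_inj {a b : String} (ha : a ∈ pvPRIORITY) (hb : b ∈ pvPRIORITY)
    (h : pvOrder.getD a 0 = pvOrder.getD b 0) : a = b := by
  have h1 := (pvIdx_fact a ha).2.2
  have h2 := (pvIdx_fact b hb).2.2
  rw [h, h2] at h1
  exact (Option.some_injective _ h1).symm

theorem insertBy_congr {α : Type} (b1 b2 : α → α → Bool) (x : α) (acc : List α)
    (h : ∀ y ∈ acc, b1 x y = b2 x y) :
    PySem.List.insertBy b1 x acc = PySem.List.insertBy b2 x acc := by
  induction acc with
  | nil => rfl
  | cons y ys ih =>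
      have hy : b1 x y = b2 x y := h y (by simp)
      simp only [PySem.List.insertBy, hy]
      split
      · rfl
      · have := ih (fun z hz => h z (by simp [hz]))
        rw [this]

theorem foldl_insertBy_congr {α : Type} (b1 b2 : α → α → Bool) :
    ∀ (xs : List α) (acc : List α),
      (∀ x ∈ xs, ∀ y ∈ acc, b1 x y = b2 x y) →
      xs.Pairwise (fun a b => b1 b a = b2 b a) →
      xs.foldl (fun acc x => PySem.List.insertBy b1 x acc) acc
        = xs.foldl (fun acc x => PySem.List.insertBy b2 x acc) acc := by
  intro xs
  induction xs with
  | nil => intro acc _ _; rfl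
  | cons x t ih =>
      intro acc hacc hpw
      have hx : PySem.List.insertBy b1 x acc = PySem.List.insertBy b2 x acc :=
        insertBy_congr b1 b2 x acc (hacc x (by simp))
      simp only [List.foldl_cons, hx]
      apply ih
      · intro x' hx' y hy
        rw [PySem.List.mem_insertBy] at hy
        rcases hy with rfl | hy
        · exact (List.pairwise_cons.mp hpw).1 x' hx'
        · exact hacc x' (by simp [hx']) y hy
      · exact (List.pairwise_cons.mp hpw).2

-- A's lexicographic before-function agrees with pvKey's on genres from PRIORITY
theorem lex_eq_key (p q : String × Int) (hp : p.1 ∈ pvPRIORITY) (hq : q.1 ∈ pvPRIORITY) :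
    (decide (-p.2 < -q.2) || (!decide (-q.2 < -p.2) && decide (pvOrder.getD p.1 0 < pvOrder.getD q.1 0)))
      = decide (pvKey p < pvKey q) := by
  obtain ⟨hp0, hp1, -⟩ := pvIdx_fact p.1 hp
  obtain ⟨hq0, hq1, -⟩ := pvIdx_fact q.1 hq
  by_cases h1 : (-p.2 : Int) < -q.2 <;> by_cases h2 : (-q.2 : Int) < -p.2 <;>
    simp [h1, h2, pvKey] <;> omega

-- the sorted list A filters: A's composite sort = sorted by pvKey
theorem A_sort_eq (scores : List (String × Int)) (hin : ∀ p ∈ scores, p.1 ∈ pvPRIORITY) :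
    PySem.List.sorted2 scores (fun item => -item.2) (fun item => pvOrder.getD item.1 0) false
      = PySem.List.sorted scores pvKey false := by
  show scores.foldl (fun acc x => PySem.List.insertBy _ x acc) []
      = scores.foldl (fun acc x => PySem.List.insertBy _ x acc) []
  apply foldl_insertBy_congr
  · intro x _ y hy; simp at hy
  · refine List.pairwise_of_forall_mem_list ?_
    intro a ha b hb
    exact lex_eq_key b a (hin b hb) (hin a ha)

-- ---- B side ----

def pvBuckets (scores : List (String × Int)) : PySem.Dict Int (List String) :=
  scores.foldl (fun b p => b.modify p.2 [] (fun l => l ++ [p.1])) PySem.Dict.empty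

theorem bucket_getD (scores : List (String × Int)) (s : Int) :
    (pvBuckets scores).getD s []
      = (scores.filter (fun p => p.2 == s)).map (fun p => p.1) := by
  unfold pvBuckets
  have hswap : scores.foldl (fun b p => b.modify p.2 [] (fun l => l ++ [p.1])) PySem.Dict.empty
      = (scores.map (fun p => (p.2, p.1))).foldl
          (fun b q => b.modify q.1 [] (fun l => l ++ [q.2])) PySem.Dict.empty := by
    rw [List.foldl_map]
  rw [hswap, PySem.Dict.getD_foldl_modify_append, PySem.Dict.getD_empty, List.nil_append,
    List.filter_map, List.map_map]
  simp [Function.comp_def]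

theorem bucket_keys_eq (scores : List (String × Int)) :
    (pvBuckets scores).keys = PySem.Set.ofList (scores.map (fun p => p.2)) := by
  unfold pvBuckets
  have h := PySem.Dict.keys_foldl_modify_key scores (fun p => p.2)
    ([] : List String) (fun _ p => fun l => l ++ [p.1]) PySem.Dict.empty
  simp only [PySem.Dict.keys_empty] at h
  rw [h, PySem.Set.update_nil_left]

theorem bucket_keys_mem (scores : List (String × Int)) (s : Int) :
    s ∈ (pvBuckets scores).keys ↔ ∃ p ∈ scores, p.2 = s := by
  rw [bucket_keys_eq, PySem.Set.mem_ofList, List.mem_map]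

theorem bucket_keys_nodup (scores : List (String × Int)) : (pvBuckets scores).keys.Nodup := by
  rw [bucket_keys_eq]; exact PySem.Set.nodup_ofList _

theorem bucket_mem {scores : List (String × Int)} {s : Int} {g : String}
    (hg : g ∈ (pvBuckets scores).getD s []) : (g, s) ∈ scores := by
  rw [bucket_getD] at hg
  obtain ⟨p, hp, rfl⟩ := List.mem_map.mp hg
  obtain ⟨hps, hbeq⟩ := List.mem_filter.mp hp
  have : p.2 = s := beq_iff_eq.mp hbeq
  rw [← this]
  exact hps

theorem bucket_nodup (scores : List (String × Int)) (hnd : (scores.map Prod.fst).Nodup)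
    (s : Int) : ((pvBuckets scores).getD s []).Nodup := by
  rw [bucket_getD]
  exact List.Nodup.sublist (List.Sublist.map _ List.filter_sublist) hnd

-- the flattened pair sequence B walks
def pvFlat (scores : List (String × Int)) : List (String × Int) :=
  (PySem.List.sorted (pvBuckets scores).keys (fun s => s) true).flatMap
    (fun s => (PySem.List.sorted ((pvBuckets scores).getD s []) (fun g => pvOrder.getD g 0) false).map
      (fun g => (g, s)))

theorem chunk_mem {scores : List (String × Int)} {s : Int} {x : String × Int}
    (hx : x ∈ (PySem.List.sorted ((pvBuckets scores).getD s []) (fun g => pvOrder.getD g 0) false).map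
        (fun g => (g, s))) :
    (x.1, s) ∈ scores ∧ x.2 = s := by
  obtain ⟨g, hg, rfl⟩ := List.mem_map.mp hx
  exact ⟨bucket_mem ((PySem.List.mem_sorted _ _ _ _).mp hg), rfl⟩

theorem flat_pairwise (scores : List (String × Int))
    (hnd : (scores.map Prod.fst).Nodup) (hin : ∀ p ∈ scores, p.1 ∈ pvPRIORITY) :
    (pvFlat scores).Pairwise (fun a b => pvKey a < pvKey b) := by
  unfold pvFlat
  rw [List.pairwise_flatMap]
  constructor
  · intro s hs
    rw [List.pairwise_map]
    have hle : (PySem.List.sorted ((pvBuckets scores).getD s []) (fun g => pvOrder.getD g 0)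
        false).Pairwise (fun a b => pvOrder.getD a 0 ≤ pvOrder.getD b 0) :=
      PySem.List.sorted_pairwise _ _
    have hbnd : (PySem.List.sorted ((pvBuckets scores).getD s []) (fun g => pvOrder.getD g 0)
        false).Nodup :=
      (PySem.List.sorted_perm _ _ _).nodup_iff.mpr (bucket_nodup scores hnd s)
    refine ((hle.and hbnd).imp_of_mem ?_)
    intro a b ha hb h
    have haP : a ∈ pvPRIORITY :=
      hin _ (bucket_mem ((PySem.List.mem_sorted _ _ _ _).mp ha))
    have hbP : b ∈ pvPRIORITY :=
      hin _ (bucket_mem ((PySem.List.mem_sorted _ _ _ _).mp hb))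
    have hlt : pvOrder.getD a 0 < pvOrder.getD b 0 :=
      lt_of_le_of_ne h.1 (fun he => h.2 (pvIdx_inj haP hbP he))
    simp only [pvKey]
    omega
  · have hdesc : (PySem.List.sorted (pvBuckets scores).keys (fun s => s) true).Pairwise
        (fun a b => b ≤ a) := PySem.List.sorted_pairwise_rev _ _
    have hknd : (PySem.List.sorted (pvBuckets scores).keys (fun s => s) true).Nodup :=
      (PySem.List.sorted_perm _ _ _).nodup_iff.mpr (bucket_keys_nodup scores)
    have hstrict : (PySem.List.sorted (pvBuckets scores).keys (fun s => s) true).Pairwise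
        (fun a b => b < a) :=
      (hdesc.and hknd).imp (fun h => lt_of_le_of_ne h.1 (fun he => h.2 he.symm))
    refine hstrict.imp ?_
    intro s1 s2 hlt x hx y hy
    obtain ⟨hxm, hx2⟩ := chunk_mem hx
    obtain ⟨hym, hy2⟩ := chunk_mem hy
    obtain ⟨hx0, hx1, -⟩ := pvIdx_fact x.1 (hin (x.1, s1) hxm)
    obtain ⟨hy0, hy1, -⟩ := pvIdx_fact y.1 (hin (y.1, s2) hym)
    simp only [pvKey]
    omega

theorem flat_perm (scores : List (String × Int))
    (hnd : (scores.map Prod.fst).Nodup) (hin : ∀ p ∈ scores, p.1 ∈ pvPRIORITY) :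
    (pvFlat scores).Perm scores := by
  have hflatnd : (pvFlat scores).Nodup :=
    (flat_pairwise scores hnd hin).imp (fun h he => absurd (he ▸ h) (lt_irrefl _))
  have hsnd : scores.Nodup := List.Nodup.of_map _ hnd
  rw [List.perm_ext_iff_of_nodup hflatnd hsnd]
  intro p
  unfold pvFlat
  rw [List.mem_flatMap]
  constructor
  · rintro ⟨s, hs, hp⟩
    obtain ⟨hpm, hp2⟩ := chunk_mem hp
    rw [← hp2] at hpm
    exact hpm
  · intro hp
    refine ⟨p.2, ?_, ?_⟩
    · rw [PySem.List.mem_sorted, bucket_keys_mem]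
      exact ⟨p, hp, rfl⟩
    · refine List.mem_map.mpr ⟨p.1, ?_, rfl⟩
      rw [PySem.List.mem_sorted, bucket_getD]
      exact List.mem_map.mpr ⟨p, List.mem_filter.mpr ⟨hp, beq_iff_eq.mpr rfl⟩, rfl⟩

theorem flat_eq_sorted (scores : List (String × Int))
    (hnd : (scores.map Prod.fst).Nodup) (hin : ∀ p ∈ scores, p.1 ∈ pvPRIORITY) :
    pvFlat scores = PySem.List.sorted scores pvKey false := by
  exact (PySem.List.sorted_eq_of_perm_of_pairwise_lt scores (pvFlat scores) pvKey
    (flat_perm scores hnd hin) (flat_pairwise scores hnd hin)).symm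

-- B's loop predicate (keep p) as a Bool
def pvKeep (scores : List (String × Int)) (p : String × Int) : Bool :=
  !(p.1 == "Literary Fiction") &&
    !(p.1 == "Philosophical Fiction" && (PySem.Dict.mk scores).contains "Philosophy"
        && decide (p.2 < (PySem.Dict.mk scores).getD "Philosophy" 0))

theorem inner_foldl (scores : List (String × Int)) (s : Int) :
    ∀ (gs : List String) (res : List String),
      gs.foldl (fun result g =>
          if g == "Literary Fiction" then result
          else if g == "Philosophical Fiction" && (PySem.Dict.mk scores).contains "Philosophy"
                  && decide (s < (PySem.Dict.mk scores).getD "Philosophy" 0) then result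
          else result ++ [g]) res
        = res ++ (gs.filter (fun g => pvKeep scores (g, s))) := by
  intro gs
  induction gs with
  | nil => intro res; simp
  | cons g t ih =>
      intro res
      simp only [List.foldl_cons]
      by_cases h1 : (g == "Literary Fiction") = true
      · rw [if_pos h1, ih, List.filter_cons_of_neg (by simp [pvKeep, h1])]
      · by_cases h2 : (g == "Philosophical Fiction" && (PySem.Dict.mk scores).contains "Philosophy"
            && decide (s < (PySem.Dict.mk scores).getD "Philosophy" 0)) = true
        · rw [if_neg h1, if_pos h2, ih, List.filter_cons_of_neg
            (by simp only [pvKeep, h2, Bool.not_true, Bool.and_false]; exact Bool.false_ne_true)]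
        · have h1' : (g == "Literary Fiction") = false := by simpa using h1
          have h2' : (g == "Philosophical Fiction" && (PySem.Dict.mk scores).contains "Philosophy"
              && decide (s < (PySem.Dict.mk scores).getD "Philosophy" 0)) = false := by
            simpa using h2
          rw [if_neg h1, if_neg h2, ih, List.filter_cons_of_pos
            (by simp only [pvKeep, h1', h2', Bool.not_false, Bool.and_self])]
          simp

theorem outer_foldl (scores : List (String × Int)) :
    ∀ (ks : List Int) (res : List String),
      ks.foldl (fun result s =>
          (PySem.List.sorted ((pvBuckets scores).getD s []) (fun g => pvOrder.getD g 0)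
            false).foldl (fun result g =>
            if g == "Literary Fiction" then result
            else if g == "Philosophical Fiction" && (PySem.Dict.mk scores).contains "Philosophy"
                    && decide (s < (PySem.Dict.mk scores).getD "Philosophy" 0) then result
            else result ++ [g]) result) res
        = res ++ ks.flatMap (fun s =>
            (PySem.List.sorted ((pvBuckets scores).getD s []) (fun g => pvOrder.getD g 0)
              false).filter (fun g => pvKeep scores (g, s))) := by
  intro ks
  induction ks with
  | nil => intro res; simp
  | cons s t ih =>
      intro res
      simp only [List.foldl_cons, List.flatMap_cons]
      rw [inner_foldl, ih, List.append_assoc]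

theorem chunk_filter (scores : List (String × Int)) (s : Int) (gs : List String) :
    gs.filter (fun g => pvKeep scores (g, s))
      = ((gs.map (fun g => (g, s))).filter (pvKeep scores)).map (fun p => p.1) := by
  rw [List.filter_map, List.map_map]
  simp [Function.comp_def]

-- B's nested loops compute the filtered genre names of pvFlat
theorem alt_eq_flat (scores : List (String × Int)) :
    sort_genres_alt scores = ((pvFlat scores).filter (pvKeep scores)).map (fun p => p.1) := by
  have h0 : sort_genres_alt scores
      = (PySem.List.sorted (pvBuckets scores).keys (fun s => s) true).foldl (fun result s =>
          (PySem.List.sorted ((pvBuckets scores).getD s []) (fun g => pvOrder.getD g 0)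
            false).foldl (fun result g =>
            if g == "Literary Fiction" then result
            else if g == "Philosophical Fiction" && (PySem.Dict.mk scores).contains "Philosophy"
                    && decide (s < (PySem.Dict.mk scores).getD "Philosophy" 0) then result
            else result ++ [g]) result) [] := rfl
  rw [h0, outer_foldl, List.nil_append]
  unfold pvFlat
  induction (PySem.List.sorted (pvBuckets scores).keys (fun s => s) true) with
  | nil => rfl
  | cons s t ih =>
      simp only [List.flatMap_cons, List.filter_append, List.map_append]
      rw [chunk_filter, ih]

theorem keep_eq_useful (scores : List (String × Int)) (hnd : (scores.map Prod.fst).Nodup)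
    (p : String × Int) (hp : p ∈ scores) :
    pvKeep scores p = item_is_useful p.1 scores := by
  have hget : (PySem.Dict.mk scores).getD p.1 0 = p.2 :=
    PySem.Dict.getD_of_mem_items (d := PySem.Dict.mk scores) hp hnd 0
  by_cases h1 : p.1 = "Literary Fiction"
  · simp [pvKeep, item_is_useful, h1]
  · by_cases h2 : p.1 = "Philosophical Fiction"
    · have hget2 : (PySem.Dict.mk scores).getD "Philosophical Fiction" 0 = p.2 := by
        rw [← h2]; exact hget
      by_cases h3 : (PySem.Dict.mk scores).contains "Philosophy" = true
      · by_cases h4 : p.2 < (PySem.Dict.mk scores).getD "Philosophy" 0 <;>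
          simp [pvKeep, item_is_useful, h2, h3, hget2, h4]; omega
      · simp [pvKeep, item_is_useful, h2, h3]
    · simp [pvKeep, item_is_useful, h1, h2]

-- ===== VERDICT (by name: the statement is the Claim_ definition above) =====
theorem sort_genres_spec : Claim_equal_sort_genres := by
  intro scores _ hpre
  obtain ⟨hnd, hin⟩ := hpre
  unfold Spec_sort_genres sort_genres
  rw [alt_eq_flat, flat_eq_sorted scores hnd hin, A_sort_eq scores hin]
  congr 1
  apply List.filter_congr
  intro p hp
  have hpmem : p ∈ scores :=
    (PySem.List.sorted_perm scores pvKey false).mem_iff.mp hp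
  exact (keep_eq_useful scores hnd p hpmem).symm
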